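/-
  THE HEADLINE FOR THE FIXED BINARIES (proofs/c6/jsmn_fixed.c → proofs/c6/fixed/jsmn_{d,s}.bin: jsmn.c with an ARGUMENT-CHECKING jsmn_parse in front of the
  unchanged body; FIXES.diff), modelled on Prog/Jsmn/Statement.lean:

    (0) THE STATEMENT THE FIX IS FOR   `jsmn_parse_fixed_correct_D / _S`: on the machine (X86.run, the model's real decoder, any processor μ with MicroOK μ, a machine
        in the model's user relation `User.Abs n m v0`), from the entry of the fixed jsmn_parse, FOR ANY CONTENT OF THE PARSER STRUCT AND OF THE TOKEN ARRAY (of num_tokens entries),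
        the run terminates, returns `Jsmn.parseFixed`'s answer (JSMN_ERROR_INVAL with nothing touched if the arguments fail the check, else the original's
        answer) and writes nothing outside the parser struct, the token array and its stack window. The original needs the precondition `Inv` for this
        (Prog/Jsmn/Theorem.lean `jsmn_parse_correct_v3_of`); the fixed function needs only the layout (`ScanPre`).
    (1) NOTHING CHANGES FOR CORRECT CALLERS   `jsmn_fixed_on_valid_json`, `jsmn_fixed_strict_on_valid_json`, `jsmn_fixed_strict_rejects_bare_primitive`: the
        conclusions of Prog/Jsmn/Statement.lean, word for word, for the fixed programs (a fresh parser passes the check: `Jsmn.parseFixed_eq`, through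
        `MainSpecFixed.toMainSpec`).
    (2) `jsmn_fixed_always_halts`, `jsmn_fixed_strict_always_halts`.

  WHICH CODE. proofs/c6/jsmn_fixed.c + proofs/c6/fixed/shim_fixed.c + start.S, the flags of proofs/c6/build_fixed.sh (= build.sh's), linked flat at 100000H;
  byte lists JsmnFDBytes.image_bytes (1659 bytes) / JsmnFSBytes.image_bytes (2384 bytes), generated from the .bin files by proofs/c6/tools/mkbytes_fixed.py.
  WHAT `exec` OBSERVES (`Program`, `start`, `readOut`, `Outputs`, `exec`: X86/Derived/Prog/Harness.lean of the model) and harness.py's layout are those of Prog/Jsmn/Statement.lean;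
  `JsonText`, `tokensOf`, `encode`, `Fits` below are the definitions of that file, repeated here (so that this file does not have to import the original images' proofs).
  HOW IT IS PROVED. The body functions have the original's bytes at the original's addresses: their proofs are the original proofs under other names
  (proofs/c6/tools/port_fixed.py writes Prog/Jsmn/Fixed/D, S from Prog/Jsmn/D, S); the new jsmn_parse is Fixed/D/ParseCheck.lean, Fixed/S/ParseCheck.lean; jsmn_init / jsmn_run / jsmn_main moved
  (Fixed/{D,S}/{Init,Run,Main}.lean); closed in Fixed/D/Closed.lean, Fixed/S/Closed.lean; the stub, the start machine and the final HLT are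
  Fixed/Start*.lean (proofs/c6/tools/port_start.py: the stub's `call` has another displacement), joined in Fixed/Runs.lean.
  WHAT IS ASSUMED. (0): the layout `ScanPre` of the call and `MicroOK μ`; (1), (2): `Fits s`, the bound on the number of tokens where a theorem has one, and
  `MicroOK μ` — the processor description is an Intel part whose vendor fields agree (X86/Derived/Prog/Reach.lean). Nothing about the binaries or the compiler.
  THE AXIOMS (the last lines of this file print them into the build log): `propext`, `Classical.choice`, `Quot.sound`, and the certificates of `bv_decide` —
  axioms named `<theorem>._native.bv_decide.ax_…`, one for each closed bit-vector fact that the model's lemma libraries (namespaces X86.Word, X86.TB,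
  X86.User) prove with that tactic. Such an axiom says that the verified checker accepts the SAT solver's certificate; it is asserted because compiled code
  evaluated the check, so it carries the trust in the Lean compiler that `native_decide` asks for. This package itself uses no `bv_decide`, no
  `native_decide`, no `sorry` and declares no axiom.
-/
import Prog.Jsmn.Fixed.Runs
import Prog.Jsmn.Fixed.D.Closed
import Prog.Jsmn.Fixed.S.Closed
import Prog.Jsmn.Fixed.MainOfFixed
import Prog.Jsmn.Fixed.Theorem
import X86.Derived.Prog.Harness

namespace JsmnFixedOnX86
open X86 (Microarch MicroOK Machine Word)
open X86.J6 (binFD binFS)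
open OnX86        -- Program, start, readOut, Outputs, exec (X86/Derived/Prog/Harness.lean)

/-- fixed/jsmn_d.bin (default configuration) and its stub: `jsmn_main(js = 200000H, len, out = 400000H, num_tokens = 3F000H)`. -/
def jsmnFixedProgram : Program := ⟨fun s => X86.J6.FStart.jsmnImage binFD s 0x3F000, 0x100000, 0x800000⟩

/-- fixed/jsmn_s.bin (-DJSMN_STRICT -DJSMN_PARENT_LINKS) and its stub: `num_tokens = 32000H`. -/
def jsmnFixedProgramStrict : Program := ⟨fun s => X86.J6.FStart.jsmnImage binFS s 0x32000, 0x100000, 0x800000⟩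

/-- `s` is a JSON text (RFC 8259 §2: ws value ws): the rendering of the well-formed tree `t` between the whitespace `w1` and `w2`. -/
structure JsonText (s w1 : List UInt8) (t : Json.Layout) (w2 : List UInt8) : Prop where
  text : s = w1 ++ t.text ++ w2
  lead : Json.IsWs w1
  tree : t.WellFormed
  trail : Json.IsWs w2

/-- The tokens jsmn should produce for the tree `t` rendered behind `w1`: one per node, in pre-order (Json/Jsmn/Expected.lean). -/
def tokensOf (w1 : List UInt8) (t : Json.Layout) : List Jsmn.Token := t.tokens w1.length 0 (-1)

/-- jsmn_main's output for a successful parse: the number of tokens (4 bytes, little-endian), then the tokens (16 bytes each; 20 with parent links). -/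
def encode (cfg : Jsmn.Config) (ts : List Jsmn.Token) : List UInt8 := Jsmn.le32 ts.length ++ ts.flatMap (Jsmn.Token.bytes cfg)

/-- The input fits the harness's buffer. -/
def Fits (s : List UInt8) : Prop := s.length ≤ 0x1FF000

/-! ### (0) The statement the fix is for -/

section
variable {n : X86.User.Layout} (μ : Microarch) (hμ : MicroOK μ) (m : Machine) (v0 : X86.User.State) (ha : X86.User.Abs n m v0)
  (ret pa jsA tb : Word) (js : List UInt8) (numTokens : Nat) (p : Jsmn.Parser) (toks : Option Jsmn.Tokens)
include hμ ha

/-- **The fixed jsmn_parse of fixed/jsmn_d.bin, on the machine, for ANY content of the parser struct and the token array**: it terminates, returns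
`Jsmn.parseFixed`'s answer, and writes nothing outside the parser struct, the token array and its 96-byte stack window. No `Inv`. -/
theorem jsmn_parse_fixed_correct_D
    (hp : X86.J6.ScanPre binFD n binFD.parse binFD.useParse v0 ret pa jsA tb js numTokens p toks)
    (hr8 : Word.low .w32 (v0.reg .r8) = UInt64.ofNat numTokens) :
    ∃ (r : Int) (p' : Jsmn.Parser) (toks' : Option Jsmn.Tokens), Jsmn.parseFixed binFD.cfg js p toks numTokens = some (r, p', toks') ∧
      ∃ k m' v', X86.run (X86.Dec.decoder μ (X86.Dec.mkTable X86.allRows)) m k = .next m' ∧ X86.User.Abs n m' v' ∧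
        X86.J6.ScanPost binFD binFD.useParse v0 ret pa tb numTokens toks r p' toks' v' ∧ m'.sysPart = m.sysPart :=
  X86.J6.jsmn_parse_fixed_correct_v3_of (X86.J6.FD.parse_fixed_closed n) μ hμ m v0 ha ret pa jsA tb js numTokens p toks hp hr8

/-- **The same for fixed/jsmn_s.bin** (strict, parent links: the check includes the loop over the allocated tokens' parent links; 104 bytes of stack). -/
theorem jsmn_parse_fixed_correct_S
    (hp : X86.J6.ScanPre binFS n binFS.parse binFS.useParse v0 ret pa jsA tb js numTokens p toks)
    (hr8 : Word.low .w32 (v0.reg .r8) = UInt64.ofNat numTokens) :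
    ∃ (r : Int) (p' : Jsmn.Parser) (toks' : Option Jsmn.Tokens), Jsmn.parseFixed binFS.cfg js p toks numTokens = some (r, p', toks') ∧
      ∃ k m' v', X86.run (X86.Dec.decoder μ (X86.Dec.mkTable X86.allRows)) m k = .next m' ∧ X86.User.Abs n m' v' ∧
        X86.J6.ScanPost binFS binFS.useParse v0 ret pa tb numTokens toks r p' toks' v' ∧ m'.sysPart = m.sysPart :=
  X86.J6.jsmn_parse_fixed_correct_v3_of (X86.J6.FS.parse_fixed_closed n) μ hμ m v0 ha ret pa jsA tb js numTokens p toks hp hr8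

end

/-! ### (1), (2) The whole programs -/

/-- jsmn_main of fixed/jsmn_d.bin satisfies the ORIGINAL contract of jsmn_main (a fresh parser passes the check). -/
theorem mainD : X86.J6.MainSpec binFD (X86.User.startLayout 0 (Or.inl rfl)) := (X86.J6.FD.main_fixed_closed _).toMainSpec
/-- jsmn_main of fixed/jsmn_s.bin likewise. -/
theorem mainS : X86.J6.MainSpec binFS (X86.User.startLayout 0 (Or.inl rfl)) := (X86.J6.FS.main_fixed_closed _).toMainSpec

/-  `MicroOK μ` IS MET: `OnX86.microOK_interp` — the processor description the interpreters of the tree run with (Granite Rapids) satisfies it.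
    `ub` is THE UNKNOWN STREAM of the start machine: the bits the processor answers with wherever the manuals leave a value undefined
    (`Machine.unknownBits`; `Interp.setup` builds the machine whose stream is all zeros, `start p s ub` is that machine with the stream `ub`).
    Every theorem is for every `ub`: whatever a processor does with its undefined flags and values. -/
variable (μ : Microarch) (hμ : MicroOK μ) (ub : Nat → Bool)
include hμ

/-- **The fixed jsmn is correct on valid JSON, on the machine** (default build): the conclusion of `JsmnOnX86.jsmn_on_valid_json`, for the fixed program. -/
theorem jsmn_fixed_on_valid_json (s w1 : List UInt8) (t : Json.Layout) (w2 : List UInt8) (h : JsonText s w1 t w2)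
    (fits : Fits s) (room : t.count ≤ 0x3F000) :
    exec μ jsmnFixedProgram ub s = some (encode .default (tokensOf w1 t)) := by
  obtain ⟨rfl, hw1, wf, hw2⟩ := h
  have : Outputs μ jsmnFixedProgram ub _ _ := X86.J6.FRuns.valid_outputs_D μ hμ ub mainD w1 t w2 hw1 hw2 wf fits room
  exact exec_eq_some_iff.2 (by simpa only [encode, tokensOf, Json.Layout.tokens_length] using this)

/-- **The fixed jsmn always halts, on the machine** (default build): on EVERY input that fits — JSON or not. -/
theorem jsmn_fixed_always_halts (s : List UInt8) (fits : Fits s) : ∃ out, exec μ jsmnFixedProgram ub s = some out := by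
  obtain ⟨r, _, ts', _, h⟩ := X86.J6.FRuns.always_outputs_D μ hμ ub mainD s fits
  exact ⟨_, exec_eq_some_iff.2 h⟩

/-- **The fixed strict build on valid JSON** (tokens with their parent links), PROVIDED a top-level number / true / false / null is followed by whitespace. -/
theorem jsmn_fixed_strict_on_valid_json (s w1 : List UInt8) (t : Json.Layout) (w2 : List UInt8) (h : JsonText s w1 t w2)
    (sep : t.isPrimitive = true → w2 ≠ []) (fits : Fits s) (room : t.count ≤ 0x32000) :
    exec μ jsmnFixedProgramStrict ub s = some (encode .strictLinks (tokensOf w1 t)) := by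
  obtain ⟨rfl, hw1, wf, hw2⟩ := h
  have : Outputs μ jsmnFixedProgramStrict ub _ _ := X86.J6.FRuns.valid_outputs_S μ hμ ub mainS w1 t w2 hw1 hw2 wf sep fits room
  exact exec_eq_some_iff.2 (by simpa only [encode, tokensOf, Json.Layout.tokens_length] using this)

/-- The fixed strict build rejects a bare top-level primitive with JSMN_ERROR_PART, as the original does. -/
theorem jsmn_fixed_strict_rejects_bare_primitive (s w1 : List UInt8) (t : Json.Layout) (h : JsonText s w1 t [])
    (prim : t.isPrimitive = true) (fits : Fits s) :
    exec μ jsmnFixedProgramStrict ub s = some (Jsmn.le32 (-3)) := by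
  obtain ⟨rfl, hw1, wf, _⟩ := h
  rw [List.append_nil] at fits ⊢
  exact exec_eq_some_iff.2 (X86.J6.FRuns.bare_primitive_outputs_S μ hμ ub mainS w1 t hw1 wf prim fits)

/-- **The fixed strict build always halts.** -/
theorem jsmn_fixed_strict_always_halts (s : List UInt8) (fits : Fits s) : ∃ out, exec μ jsmnFixedProgramStrict ub s = some out := by
  obtain ⟨r, _, ts', _, h⟩ := X86.J6.FRuns.always_outputs_S μ hμ ub mainS s fits
  exact ⟨_, exec_eq_some_iff.2 h⟩

end JsmnFixedOnX86

#print axioms JsmnFixedOnX86.jsmn_parse_fixed_correct_D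
#print axioms JsmnFixedOnX86.jsmn_parse_fixed_correct_S
#print axioms JsmnFixedOnX86.jsmn_fixed_on_valid_json
#print axioms JsmnFixedOnX86.jsmn_fixed_always_halts
#print axioms JsmnFixedOnX86.jsmn_fixed_strict_on_valid_json
#print axioms JsmnFixedOnX86.jsmn_fixed_strict_always_halts
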